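-- pv_equiv track=rewrite | github.com/dimitreOliveira/Google-QUEST-QA-Labeling | Scripts/googleqa-utilityscript.py | _get_segments
-- ===== SOURCE A (Python) =====
-- def _get_segments(tokens, max_seq_length, ignore_first_sep=True):
--     """Segments: 0 for the first sequence, 1 for the second"""
--     if len(tokens)>max_seq_length:
--         raise IndexError("Token length more than max seq length!")
--     segments = []
--     current_segment_id = 0
--     for token in tokens:
--         segments.append(current_segment_id)
--         if token == "[SEP]":
--             if ignore_first_sep:
--                 ignore_first_sep = False
--             else:
--                 current_segment_id = 1
--     return segments + [0] * (max_seq_length - len(tokens))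
-- ===== SOURCE B (Python) =====
-- def _get_segments(tokens, max_seq_length, ignore_first_sep=True):
--     """Segments: 0 for the first sequence, 1 for the second"""
--     if len(tokens) > max_seq_length:
--         raise IndexError("Token length more than max seq length!")
--     # find the triggering [SEP]: the 2nd occurrence if ignore_first_sep, else the 1st
--     if ignore_first_sep and "[SEP]" in tokens:
--         skipped = tokens.index("[SEP]") + 1
--     else:
--         skipped = 0
--     rest = tokens[skipped:]
--     if "[SEP]" in rest:
--         b = skipped + rest.index("[SEP]")
--         segments = [0] * (b + 1) + [1] * (len(tokens) - b - 1)
--     else: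
--         segments = [0] * len(tokens)
--     return segments + [0] * (max_seq_length - len(tokens))
-- ===== Notes on version B (the rewrite author's own statement) =====
-- stated objective: alternative
-- what changed: Replaces the stateful per-token loop (segment-id/flag state machine) with a direct construction: locate the triggering [SEP] via membership + .index and build the result as replicate blocks [0]*(b+1)+[1]*(n-b-1) plus padding.
import Mathlib
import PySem

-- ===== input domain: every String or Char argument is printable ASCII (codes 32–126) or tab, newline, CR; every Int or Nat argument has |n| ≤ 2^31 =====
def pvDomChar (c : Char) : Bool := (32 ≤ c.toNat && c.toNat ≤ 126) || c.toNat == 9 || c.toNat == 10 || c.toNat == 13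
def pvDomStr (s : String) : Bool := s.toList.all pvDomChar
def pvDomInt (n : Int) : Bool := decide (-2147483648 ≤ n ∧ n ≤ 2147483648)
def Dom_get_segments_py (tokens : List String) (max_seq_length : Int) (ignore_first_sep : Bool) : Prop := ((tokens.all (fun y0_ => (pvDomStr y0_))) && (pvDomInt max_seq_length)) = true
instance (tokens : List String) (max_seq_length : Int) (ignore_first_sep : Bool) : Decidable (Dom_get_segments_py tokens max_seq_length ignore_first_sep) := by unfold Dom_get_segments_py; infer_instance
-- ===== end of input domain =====

-- B replaces the per-token state machine with a boundary search + replicate blocks (alternative decomposition).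
-- Pre_ excludes len(tokens) > max_seq_length, where A (and B) raise IndexError.
-- ===== PORT A =====
-- loop body of A: state = (segments, current_segment_id, ignore_first_sep)
def segLoop : List String → List Int → Int → Bool → List Int
  | [], segments, _, _ => segments
  | token :: rest, segments, cur, ign =>
    let segments := segments ++ [cur]
    if token == "[SEP]" then
      if ign then segLoop rest segments cur false
      else segLoop rest segments 1 ign
    else segLoop rest segments cur ign

def get_segments_py (tokens : List String) (max_seq_length : Int) (ignore_first_sep : Bool) : List Int :=
  let segments := segLoop tokens [] 0 ignore_first_sep
  segments ++ List.replicate (max_seq_length - tokens.length).toNat (0 : Int)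

-- ===== PORT B =====
def get_segments_py_alt (tokens : List String) (max_seq_length : Int) (ignore_first_sep : Bool) : List Int :=
  let skipped : Nat :=
    if ignore_first_sep && tokens.contains "[SEP]" then
      ((PySem.List.index? tokens "[SEP]").getD 0) + 1
    else 0
  let rest := PySem.List.slice tokens (some (skipped : Int)) none
  let segments : List Int :=
    if rest.contains "[SEP]" then
      let b := skipped + (PySem.List.index? rest "[SEP]").getD 0
      List.replicate (b + 1) (0 : Int) ++ List.replicate (tokens.length - b - 1) (1 : Int)
    else
      List.replicate tokens.length (0 : Int)
  segments ++ List.replicate (max_seq_length - tokens.length).toNat (0 : Int)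

-- ===== PRECONDITION & SPEC =====
-- A raises IndexError when len(tokens) > max_seq_length; those inputs are excluded.
def Pre_get_segments_py (tokens : List String) (max_seq_length : Int) (ignore_first_sep : Bool) : Prop :=
  (tokens.length : Int) ≤ max_seq_length
instance (tokens : List String) (max_seq_length : Int) (ignore_first_sep : Bool) : Decidable (Pre_get_segments_py tokens max_seq_length ignore_first_sep) := by unfold Pre_get_segments_py; infer_instance
def pvWitness_get_segments_py : List String × Int × Bool := (["a", "[SEP]", "b", "[SEP]", "c"], 7, true)
def Spec_get_segments_py (tokens : List String) (max_seq_length : Int) (ignore_first_sep : Bool) (out : List Int) : Prop := out = get_segments_py_alt tokens max_seq_length ignore_first_sep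
instance (tokens : List String) (max_seq_length : Int) (ignore_first_sep : Bool) (out : List Int) : Decidable (Spec_get_segments_py tokens max_seq_length ignore_first_sep out) := by unfold Spec_get_segments_py; infer_instance

-- ===== CLAIM (what is proved, stated in full; the proofs are below) =====
def Claim_equal_get_segments_py : Prop := ∀ (tokens : List String) (max_seq_length : Int) (ignore_first_sep : Bool), Dom_get_segments_py tokens max_seq_length ignore_first_sep → Pre_get_segments_py tokens max_seq_length ignore_first_sep → Spec_get_segments_py tokens max_seq_length ignore_first_sep (get_segments_py tokens max_seq_length ignore_first_sep)

-- ===== LEMMAS AND PROOFS =====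
-- closed form of A's loop once the segment id has switched to 1
theorem segLoop_one (ts : List String) (segs : List Int) (ign : Bool) :
    segLoop ts segs 1 ign = segs ++ List.replicate ts.length (1 : Int) := by
  induction ts generalizing segs ign with
  | nil => simp [segLoop]
  | cons t rest ih =>
    simp only [segLoop]
    split_ifs <;> simp [ih, List.replicate_succ]

-- closed form of A's result when ignore_first_sep is already False and id still 0
def closed0 (ts : List String) : List Int :=
  match PySem.List.index? ts "[SEP]" with
  | some b => List.replicate (b + 1) (0 : Int) ++ List.replicate (ts.length - b - 1) (1 : Int)
  | none => List.replicate ts.length (0 : Int)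

theorem closed0_cons_ne {t : String} (rest : List String) (h : t ≠ "[SEP]") :
    closed0 (t :: rest) = 0 :: closed0 rest := by
  unfold closed0
  rw [PySem.List.index?_cons_of_ne rest h]
  cases hb : PySem.List.index? rest "[SEP]" with
  | none => simp [List.replicate_succ]
  | some b =>
    simp only [Option.map_some]
    have e : rest.length + 1 - (b + 1) - 1 = rest.length - b - 1 := by omega
    simp [List.length_cons, e, List.replicate_succ]

theorem segLoop_zero_false (ts : List String) (segs : List Int) :
    segLoop ts segs 0 false = segs ++ closed0 ts := by
  induction ts generalizing segs with
  | nil => simp [segLoop, closed0, PySem.List.index?]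
  | cons t rest ih =>
    by_cases h : t = "[SEP]"
    · subst h
      simp only [segLoop, if_pos rfl, Bool.false_eq_true, if_false, segLoop_one, closed0,
        PySem.List.index?_cons_self]
      simp [List.replicate_succ]
    · have hne : (t == "[SEP]") = false := by simp [h]
      simp only [segLoop, hne, Bool.false_eq_true, if_false, ih]
      simp [closed0_cons_ne rest h]

-- closed form of A's result from the initial state (id 0, ignore flag still set)
def closed1 (ts : List String) : List Int :=
  match PySem.List.index? ts "[SEP]" with
  | some b => List.replicate (b + 1) (0 : Int) ++ closed0 (ts.drop (b + 1))
  | none => List.replicate ts.length (0 : Int)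

theorem closed1_cons_ne {t : String} (rest : List String) (h : t ≠ "[SEP]") :
    closed1 (t :: rest) = 0 :: closed1 rest := by
  unfold closed1
  rw [PySem.List.index?_cons_of_ne rest h]
  cases hb : PySem.List.index? rest "[SEP]" with
  | none => simp [List.replicate_succ]
  | some b => simp [List.replicate_succ]

theorem segLoop_zero_true (ts : List String) (segs : List Int) :
    segLoop ts segs 0 true = segs ++ closed1 ts := by
  induction ts generalizing segs with
  | nil => simp [segLoop, closed1, PySem.List.index?]
  | cons t rest ih =>
    by_cases h : t = "[SEP]"
    · subst h
      simp only [segLoop, if_pos rfl, segLoop_zero_false, closed1,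
        PySem.List.index?_cons_self]
      simp [List.replicate_succ]
    · have hne : (t == "[SEP]") = false := by simp [h]
      simp only [segLoop, hne, Bool.false_eq_true, if_false, ih]
      simp [closed1_cons_ne rest h]

theorem index?_lt_length {ts : List String} {v : String} {b : Nat}
    (h : PySem.List.index? ts v = some b) : b < ts.length := by
  obtain ⟨hk, _, _⟩ := PySem.List.getElem_of_index?_eq_some h
  exact hk

theorem closed0_eq (ts : List String) :
    closed0 ts =
      (if ts.contains "[SEP]" then
        List.replicate ((PySem.List.index? ts "[SEP]").getD 0 + 1) (0 : Int) ++
          List.replicate (ts.length - (PySem.List.index? ts "[SEP]").getD 0 - 1) (1 : Int)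
      else List.replicate ts.length (0 : Int)) := by
  unfold closed0
  cases hb : PySem.List.index? ts "[SEP]" with
  | none =>
    have hnm : "[SEP]" ∉ ts := (PySem.List.index?_eq_none_iff ts "[SEP]").mp hb
    simp [List.contains_eq_mem, hnm]
  | some b =>
    have hm : "[SEP]" ∈ ts := (PySem.List.index?_isSome_iff ts "[SEP]").mp (by rw [hb]; rfl)
    simp [List.contains_eq_mem, hm, hb]

theorem main_eq (tokens : List String) (ign : Bool) :
    segLoop tokens [] 0 ign =
      (let skipped : Nat :=
        if ign && tokens.contains "[SEP]" then
          ((PySem.List.index? tokens "[SEP]").getD 0) + 1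
        else 0
      let rest := PySem.List.slice tokens (some (skipped : Int)) none
      if rest.contains "[SEP]" then
        let b := skipped + (PySem.List.index? rest "[SEP]").getD 0
        List.replicate (b + 1) (0 : Int) ++ List.replicate (tokens.length - b - 1) (1 : Int)
      else
        List.replicate tokens.length (0 : Int)) := by
  cases ign with
  | false =>
    rw [segLoop_zero_false, List.nil_append, closed0_eq]
    simp [PySem.List.slice_from_natCast]
  | true =>
    rw [segLoop_zero_true, List.nil_append]
    unfold closed1
    cases hb : PySem.List.index? tokens "[SEP]" with
    | none =>
      have hnm : "[SEP]" ∉ tokens := (PySem.List.index?_eq_none_iff tokens "[SEP]").mp hb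
      simp [List.contains_eq_mem, hnm, PySem.List.slice_from_natCast]
    | some b =>
      have hm : "[SEP]" ∈ tokens := (PySem.List.index?_isSome_iff tokens "[SEP]").mp (by rw [hb]; rfl)
      have hlt : b < tokens.length := index?_lt_length hb
      simp only [List.contains_eq_mem, decide_eq_true_eq, hm, decide_true, Bool.and_self,
        if_true, hb, Option.getD_some, PySem.List.slice_from_natCast]
      rw [closed0_eq]
      by_cases hm2 : "[SEP]" ∈ tokens.drop (b + 1)
      · obtain ⟨b', hb'⟩ : ∃ b', PySem.List.index? (tokens.drop (b + 1)) "[SEP]" = some b' :=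
          Option.isSome_iff_exists.mp ((PySem.List.index?_isSome_iff _ _).mpr hm2)
        have hlt' : b' < (tokens.drop (b + 1)).length := index?_lt_length hb'
        rw [List.length_drop] at hlt'
        simp only [List.contains_eq_mem, decide_eq_true_eq, hm2, decide_true, if_true, hb',
          Option.getD_some, List.length_drop]
        rw [← List.append_assoc, ← List.replicate_add]
        congr 2 <;> omega
      · simp only [List.contains_eq_mem, decide_eq_true_eq, hm2, decide_false,
          Bool.false_eq_true, if_false, List.length_drop]
        rw [← List.replicate_add]
        congr 1
        omega

-- ===== VERDICT (by name: the statement is the Claim_ definition above) =====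
theorem get_segments_py_spec : Claim_equal_get_segments_py := by
  intro tokens max_seq_length ign _ _
  unfold Spec_get_segments_py get_segments_py get_segments_py_alt
  rw [main_eq]
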